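-- pv_equiv track=rewrite | github.com/bertharo/candilift | analysis_engine.py | _get_entry_level_skills
-- ===== SOURCE A (Python) =====
-- from typing import Dict, List, Any, Optional
--
-- def _get_entry_level_skills(job_skills: List[str], resume_skills: set) -> List[str]:
--     """Get entry-level skills that are easier for beginners - dynamic analysis"""
--     resume_skills_lower = {skill.lower() for skill in resume_skills}
--
--     # Dynamic skill difficulty analysis based on common patterns
--     # No hardcoded lists - analyze based on actual job requirements
--
--     entry_level_skills = []
--
--     # Prioritize skills the candidate already has
--     for skill in job_skills:
--         if skill.lower() in resume_skills_lower:
--             entry_level_skills.append(skill)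
--
--     # Analyze remaining skills for entry-level suitability
--     for skill in job_skills:
--         if skill not in entry_level_skills and len(entry_level_skills) < 4:
--             # Dynamic analysis: skills with shorter names and common patterns are typically easier
--             skill_lower = skill.lower()
--
--             # Common beginner-friendly patterns
--             is_beginner_friendly = (
--                 len(skill) <= 8 or  # Shorter skill names
--                 skill_lower in ['html', 'css', 'sql', 'git'] or  # Fundamental skills
--                 'script' in skill_lower or  # Scripting languages
--                 skill_lower in ['javascript', 'python', 'java']  # Common first languages
--             )
--
--             if is_beginner_friendly:
--                 entry_level_skills.append(skill)
--
--     # Fill remaining slots with other skills if needed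
--     for skill in job_skills:
--         if skill not in entry_level_skills and len(entry_level_skills) < 4:
--             entry_level_skills.append(skill)
--
--     return entry_level_skills[:4]
-- ===== SOURCE B (Python) =====
-- def _get_entry_level_skills(job_skills, resume_skills):
--     """Bucket classification: one pass splits job_skills into have/easy/other, then assemble."""
--     resume_skills_lower = {skill.lower() for skill in resume_skills}
--
--     def is_beginner_friendly(skill):
--         sl = skill.lower()
--         return (len(skill) <= 8
--                 or sl in ('html', 'css', 'sql', 'git')
--                 or 'script' in sl
--                 or sl in ('javascript', 'python', 'java'))
--
--     have, easy, other = [], [], []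
--     for skill in job_skills:
--         if skill.lower() in resume_skills_lower:
--             have.append(skill)
--         elif is_beginner_friendly(skill):
--             easy.append(skill)
--         else:
--             other.append(skill)
--
--     result = have  # duplicates kept, no cap (matches pass 1)
--     for skill in easy + other:
--         if skill not in result and len(result) < 4:
--             result.append(skill)
--     return result[:4]
-- ===== Notes on version B (the rewrite author's own statement) =====
-- stated objective: simpler
-- what changed: Replaces A's three full scans of job_skills (have / beginner-friendly / filler) by a single classifying pass into three buckets followed by one capped deduplicating assembly fold over easy ++ other.
import Mathlib
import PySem

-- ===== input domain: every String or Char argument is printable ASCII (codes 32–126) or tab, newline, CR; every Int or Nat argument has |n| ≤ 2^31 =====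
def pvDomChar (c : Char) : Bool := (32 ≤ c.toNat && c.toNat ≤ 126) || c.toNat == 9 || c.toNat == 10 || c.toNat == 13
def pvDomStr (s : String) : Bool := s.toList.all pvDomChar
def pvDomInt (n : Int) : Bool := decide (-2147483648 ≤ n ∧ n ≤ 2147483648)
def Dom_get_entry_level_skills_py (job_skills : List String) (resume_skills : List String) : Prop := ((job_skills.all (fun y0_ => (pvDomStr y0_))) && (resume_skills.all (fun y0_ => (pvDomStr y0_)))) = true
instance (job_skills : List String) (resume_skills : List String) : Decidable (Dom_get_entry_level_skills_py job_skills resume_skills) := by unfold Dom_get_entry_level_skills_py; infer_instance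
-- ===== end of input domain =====

-- ===== PORT A =====
-- B reorganises A's three scans into one bucket-classifying pass plus a single capped assembly fold (objective: simpler decomposition; same result).
def get_entry_level_skills_py (job_skills : List String) (resume_skills : List String) : List String :=
  -- resume_skills_lower = {skill.lower() for skill in resume_skills}
  let resume_skills_lower : PySem.Set String := PySem.Set.ofList (resume_skills.map PySem.Str.lower)
  -- pass 1: prioritize skills the candidate already has (no dedup, no cap)
  let e1 := job_skills.foldl (fun acc skill =>
      if PySem.Set.contains resume_skills_lower (PySem.Str.lower skill) then acc ++ [skill] else acc) []
  -- pass 2: beginner-friendly skills, deduped against the list, capped at 4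
  let e2 := job_skills.foldl (fun acc skill =>
      if skill ∉ acc ∧ acc.length < 4 then
        let skill_lower := PySem.Str.lower skill
        let is_beginner_friendly :=
          decide (PySem.Str.len skill ≤ 8) ||
          decide (skill_lower ∈ ["html", "css", "sql", "git"]) ||
          PySem.Str.isIn "script" skill_lower ||
          decide (skill_lower ∈ ["javascript", "python", "java"])
        if is_beginner_friendly then acc ++ [skill] else acc
      else acc) e1
  -- pass 3: fill remaining slots
  let e3 := job_skills.foldl (fun acc skill =>
      if skill ∉ acc ∧ acc.length < 4 then acc ++ [skill] else acc) e2
  e3.take 4  -- entry_level_skills[:4]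

-- ===== PORT B =====
def pvIsBeginnerFriendly (skill : String) : Bool :=
  let sl := PySem.Str.lower skill
  decide (PySem.Str.len skill ≤ 8) ||
  decide (sl ∈ ["html", "css", "sql", "git"]) ||
  PySem.Str.isIn "script" sl ||
  decide (sl ∈ ["javascript", "python", "java"])

def get_entry_level_skills_py_alt (job_skills : List String) (resume_skills : List String) : List String :=
  let rsl : PySem.Set String := PySem.Set.ofList (resume_skills.map PySem.Str.lower)
  -- one pass: classify each job skill into have / easy / other
  let buckets := job_skills.foldl
      (fun (t : List String × List String × List String) skill =>
        if PySem.Set.contains rsl (PySem.Str.lower skill) then (t.1 ++ [skill], t.2.1, t.2.2)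
        else if pvIsBeginnerFriendly skill then (t.1, t.2.1 ++ [skill], t.2.2)
        else (t.1, t.2.1, t.2.2 ++ [skill])) ([], [], [])
  -- result = have (duplicates kept, no cap); then append easy ++ other deduped, capped at 4
  let result := (buckets.2.1 ++ buckets.2.2).foldl
      (fun acc skill => if skill ∉ acc ∧ acc.length < 4 then acc ++ [skill] else acc) buckets.1
  result.take 4

-- ===== PRECONDITION & SPEC =====
def Spec_get_entry_level_skills_py (job_skills : List String) (resume_skills : List String) (out : List String) : Prop := out = get_entry_level_skills_py_alt job_skills resume_skills
instance (job_skills : List String) (resume_skills : List String) (out : List String) : Decidable (Spec_get_entry_level_skills_py job_skills resume_skills out) := by unfold Spec_get_entry_level_skills_py; infer_instance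

-- ===== CLAIM (what is proved, stated in full; the proofs are below) =====
def Claim_equal_get_entry_level_skills_py : Prop := ∀ (job_skills : List String) (resume_skills : List String), Dom_get_entry_level_skills_py job_skills resume_skills → Spec_get_entry_level_skills_py job_skills resume_skills (get_entry_level_skills_py job_skills resume_skills)

-- ===== LEMMAS AND PROOFS =====

-- the "have" test, the capped append step, and pass 2's step, named for the proofs
def pvHave (rsl : List String) (s : String) : Bool := PySem.Set.contains rsl (PySem.Str.lower s)
def pvStep (acc : List String) (s : String) : List String :=
  if s ∉ acc ∧ acc.length < 4 then acc ++ [s] else acc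
def pvStep2 (acc : List String) (s : String) : List String :=
  if s ∉ acc ∧ acc.length < 4 then (if pvIsBeginnerFriendly s then acc ++ [s] else acc) else acc
def pvEasy (rsl : List String) (s : String) : Bool := !pvHave rsl s && pvIsBeginnerFriendly s
def pvOther (rsl : List String) (s : String) : Bool := !pvHave rsl s && !pvIsBeginnerFriendly s

-- the accumulator of each step only grows by appending
lemma pvFoldl_prefix {f : List String → String → List String}
    (hf : ∀ a s, f a s = a ∨ f a s = a ++ [s]) :
    ∀ (l : List String) (acc : List String), acc <+: List.foldl f acc l := by
  intro l
  induction l with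
  | nil => intro acc; exact List.prefix_rfl
  | cons s l ih =>
    intro acc
    have h1 : acc <+: f acc s := by
      rcases hf acc s with h | h
      · rw [h]
      · rw [h]; exact List.prefix_append acc [s]
    exact h1.trans (ih (f acc s))

lemma pvStep_shape : ∀ (a : List String) (s : String), pvStep a s = a ∨ pvStep a s = a ++ [s] := by
  intro a s; unfold pvStep; split_ifs <;> simp

lemma pvStep2_shape : ∀ (a : List String) (s : String), pvStep2 a s = a ∨ pvStep2 a s = a ++ [s] := by
  intro a s; unfold pvStep2; split_ifs <;> simp

lemma pvStep2_mem {acc : List String} {x : String} (h : x ∈ acc) (l : List String) :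
    x ∈ List.foldl pvStep2 acc l := (pvFoldl_prefix pvStep2_shape l acc).subset h

lemma pvStep2_len {acc : List String} (l : List String) :
    acc.length ≤ (List.foldl pvStep2 acc l).length := (pvFoldl_prefix pvStep2_shape l acc).length_le

lemma pvStep_len_one {acc : List String} (s : String) :
    acc.length ≤ (pvStep acc s).length := by
  rcases pvStep_shape acc s with h | h
  · rw [h]
  · rw [h]; simp

lemma pvStep_mem_one {acc : List String} {x : String} (h : x ∈ acc) (s : String) :
    x ∈ pvStep acc s := by
  rcases pvStep_shape acc s with h' | h' <;> rw [h'] <;> simp [h]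

lemma pvStep2_mem_one {acc : List String} {x : String} (h : x ∈ acc) (s : String) :
    x ∈ pvStep2 acc s := by
  rcases pvStep2_shape acc s with h' | h' <;> rw [h'] <;> simp [h]

-- pass 1 collects exactly the "have" bucket
lemma pvPass1 (rsl : List String) :
    ∀ (l acc : List String),
      List.foldl (fun a s => if pvHave rsl s then a ++ [s] else a) acc l
        = acc ++ l.filter (pvHave rsl) := by
  intro l
  induction l with
  | nil => intro acc; simp
  | cons s l ih =>
    intro acc
    by_cases h : pvHave rsl s = true <;> simp [h, ih]

-- B's classifying pass produces the three filter buckets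
lemma pvBuckets (rsl : List String) :
    ∀ (l : List String) (t : List String × List String × List String),
      List.foldl
        (fun (t : List String × List String × List String) s =>
          if pvHave rsl s then (t.1 ++ [s], t.2.1, t.2.2)
          else if pvIsBeginnerFriendly s then (t.1, t.2.1 ++ [s], t.2.2)
          else (t.1, t.2.1, t.2.2 ++ [s])) t l
      = (t.1 ++ l.filter (pvHave rsl), t.2.1 ++ l.filter (pvEasy rsl), t.2.2 ++ l.filter (pvOther rsl)) := by
  intro l
  induction l with
  | nil => intro t; simp
  | cons s l ih =>
    intro t
    by_cases h1 : pvHave rsl s = true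
    · simp [h1, ih, pvEasy, pvOther]
    · by_cases h2 : pvIsBeginnerFriendly s = true <;>
        simp [h1, h2, ih, pvEasy, pvOther]

-- pass 2 over all skills = the capped append fold over the "easy" bucket only
lemma pvPass2 (rsl : List String) :
    ∀ (l acc : List String), (∀ s ∈ l, pvHave rsl s = true → s ∈ acc) →
      List.foldl pvStep2 acc l = List.foldl pvStep acc (l.filter (pvEasy rsl)) := by
  intro l
  induction l with
  | nil => intro acc _; simp
  | cons s l ih =>
    intro acc hacc
    by_cases h1 : pvHave rsl s = true
    · have hs : s ∈ acc := hacc s (by simp) h1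
      have hid : pvStep2 acc s = acc := by unfold pvStep2; split_ifs with h <;> simp_all
      have hfe : pvEasy rsl s = false := by simp [pvEasy, h1]
      simp only [List.foldl_cons, hid, List.filter_cons, hfe]
      exact ih acc (fun x hx => hacc x (by simp [hx]))
    · by_cases h2 : pvIsBeginnerFriendly s = true
      · have hst : pvStep2 acc s = pvStep acc s := by
          unfold pvStep2 pvStep; split_ifs <;> simp_all
        have hfe : pvEasy rsl s = true := by simp [pvEasy, h1, h2]
        simp only [List.foldl_cons, hst, List.filter_cons, hfe, if_pos]
        exact ih (pvStep acc s) (fun x hx hhx => pvStep_mem_one (hacc x (by simp [hx]) hhx) s)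
      · have hid : pvStep2 acc s = acc := by
          unfold pvStep2; split_ifs <;> simp_all
        have hfe : pvEasy rsl s = false := by simp [pvEasy, h2]
        simp only [List.foldl_cons, hid, List.filter_cons, hfe]
        exact ih acc (fun x hx => hacc x (by simp [hx]))

-- after pass 2, every easy skill of the list is either in the result or the cap is reached
lemma pvPass2_inv (rsl : List String) :
    ∀ (l acc : List String), ∀ s ∈ l, pvEasy rsl s = true →
      s ∈ List.foldl pvStep2 acc l ∨ 4 ≤ (List.foldl pvStep2 acc l).length := by
  intro l
  induction l with
  | nil => intro acc s hs; simp at hs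
  | cons a l ih =>
    intro acc s hs he
    rcases List.mem_cons.mp hs with rfl | hs
    · simp only [List.foldl_cons]
      by_cases hin : s ∈ acc
      · exact Or.inl (pvStep2_mem (pvStep2_mem_one hin s) l)
      · by_cases hlen : acc.length < 4
        · have hf : pvIsBeginnerFriendly s = true := by
            have h' := he; simp [pvEasy] at h'; exact h'.2
          have hstep : pvStep2 acc s = acc ++ [s] := by
            unfold pvStep2; rw [if_pos ⟨hin, hlen⟩, if_pos hf]
          exact Or.inl (pvStep2_mem (by simp [hstep]) l)
        · have hstep : pvStep2 acc s = acc := by unfold pvStep2; split_ifs <;> simp_all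
          rw [hstep]
          exact Or.inr (le_trans (by omega) (pvStep2_len l))
    · simp only [List.foldl_cons]
      exact ih (pvStep2 acc a) s hs he

-- pass 3 over all skills = the capped append fold over the "other" bucket only
lemma pvPass3 (rsl : List String) :
    ∀ (l acc : List String),
      (∀ s ∈ l, pvHave rsl s = true → s ∈ acc) →
      (∀ s ∈ l, pvEasy rsl s = true → s ∈ acc ∨ 4 ≤ acc.length) →
      List.foldl pvStep acc l = List.foldl pvStep acc (l.filter (pvOther rsl)) := by
  intro l
  induction l with
  | nil => intro acc _ _; simp
  | cons s l ih =>
    intro acc hH hE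
    by_cases h1 : pvHave rsl s = true
    · have hs : s ∈ acc := hH s (by simp) h1
      have hid : pvStep acc s = acc := by unfold pvStep; split_ifs <;> simp_all
      have hfo : pvOther rsl s = false := by simp [pvOther, h1]
      simp only [List.foldl_cons, hid, List.filter_cons, hfo]
      exact ih acc (fun x hx => hH x (by simp [hx])) (fun x hx => hE x (by simp [hx]))
    · by_cases h2 : pvIsBeginnerFriendly s = true
      · have hfo : pvOther rsl s = false := by simp [pvOther, h2]
        have hid : pvStep acc s = acc := by
          rcases hE s (by simp) (by simp [pvEasy, h1, h2]) with h | h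
          · unfold pvStep; split_ifs <;> simp_all
          · unfold pvStep; split_ifs with hc
            · omega
            · rfl
        simp only [List.foldl_cons, hid, List.filter_cons, hfo]
        exact ih acc (fun x hx => hH x (by simp [hx])) (fun x hx => hE x (by simp [hx]))
      · have hfo : pvOther rsl s = true := by simp [pvOther, h1, h2]
        simp only [List.foldl_cons, List.filter_cons, hfo, if_pos]
        refine ih (pvStep acc s) (fun x hx hhx => pvStep_mem_one (hH x (by simp [hx]) hhx) s)
          (fun x hx hex => ?_)
        rcases hE x (by simp [hx]) hex with h | h
        · exact Or.inl (pvStep_mem_one h s)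
        · exact Or.inr (le_trans h (pvStep_len_one s))

-- ===== VERDICT (by name: the statement is the Claim_ definition above) =====
theorem get_entry_level_skills_py_spec : Claim_equal_get_entry_level_skills_py := by
  intro job_skills resume_skills _
  unfold Spec_get_entry_level_skills_py get_entry_level_skills_py get_entry_level_skills_py_alt
  set rsl : List String := PySem.Set.ofList (resume_skills.map PySem.Str.lower) with hrsl
  show (List.foldl pvStep
        (List.foldl pvStep2
          (List.foldl (fun a s => if pvHave rsl s then a ++ [s] else a) [] job_skills)
          job_skills)
        job_skills).take 4
    = (List.foldl pvStep
        (List.foldl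
          (fun (t : List String × List String × List String) s =>
            if pvHave rsl s then (t.1 ++ [s], t.2.1, t.2.2)
            else if pvIsBeginnerFriendly s then (t.1, t.2.1 ++ [s], t.2.2)
            else (t.1, t.2.1, t.2.2 ++ [s])) ([], [], []) job_skills).1
        ((List.foldl
          (fun (t : List String × List String × List String) s =>
            if pvHave rsl s then (t.1 ++ [s], t.2.1, t.2.2)
            else if pvIsBeginnerFriendly s then (t.1, t.2.1 ++ [s], t.2.2)
            else (t.1, t.2.1, t.2.2 ++ [s])) ([], [], []) job_skills).2.1 ++
         (List.foldl
          (fun (t : List String × List String × List String) s =>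
            if pvHave rsl s then (t.1 ++ [s], t.2.1, t.2.2)
            else if pvIsBeginnerFriendly s then (t.1, t.2.1 ++ [s], t.2.2)
            else (t.1, t.2.1, t.2.2 ++ [s])) ([], [], []) job_skills).2.2)).take 4
  rw [pvBuckets rsl job_skills ([], [], [])]
  rw [pvPass1 rsl job_skills []]
  simp only [List.nil_append, List.foldl_append]
  set e1 := job_skills.filter (pvHave rsl) with he1
  have hH1 : ∀ s ∈ job_skills, pvHave rsl s = true → s ∈ e1 := by
    intro s hs h; rw [he1]; exact List.mem_filter.mpr ⟨hs, h⟩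
  rw [pvPass3 rsl job_skills _
    (fun s hs h => pvStep2_mem (hH1 s hs h) job_skills)
    (fun s hs he => pvPass2_inv rsl job_skills e1 s hs he)]
  rw [pvPass2 rsl job_skills e1 hH1]
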